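-- pv_equiv track=rewrite | github.com/YOYOXUE/DataMining | HW2/SON.py | count_singletons
-- ===== SOURCE A (Python) =====
-- def count_singletons(candidates,baskets):
--     itemset_size = 1
--     result = []
--     if candidates:
--         itemset_size = len(candidates[0])
--
--     if not candidates:
--         count = {}
--         for basket in baskets:
--             for item in basket:
--                 count[item] = count.get(item,0) + 1
--         for (item, count) in count.items():
--             result.append([item, count])
--     else:
--         result = candidates
--     result.sort()
--     return result
-- ===== SOURCE B (Python) =====
-- def count_singletons(candidates, baskets):
--     # Sort-then-group: instead of hashing counts into a dict and sorting at the
--     # end, sort the flattened items once and emit one [item, run-length] pair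
--     # per maximal run of equal elements; the output comes out already sorted.
--     if candidates:
--         candidates.sort()
--         return candidates
--     flat = sorted(item for basket in baskets for item in basket)
--     result = []
--     i = 0
--     n = len(flat)
--     while i < n:
--         j = i
--         while j < n and flat[j] == flat[i]:
--             j += 1
--         result.append([flat[i], j - i])
--         i = j
--     return result
-- ===== Notes on version B (the rewrite author's own statement) =====
-- stated objective: alternative
-- what changed: Replaces dict-based hash counting plus a final sort with sort-then-group: flatten the baskets, sort the flat list once, and walk maximal runs of equal elements to emit [item, run-length] pairs that come out already sorted; the candidates branch becomes an early return after the in-place sort.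
import Mathlib
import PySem

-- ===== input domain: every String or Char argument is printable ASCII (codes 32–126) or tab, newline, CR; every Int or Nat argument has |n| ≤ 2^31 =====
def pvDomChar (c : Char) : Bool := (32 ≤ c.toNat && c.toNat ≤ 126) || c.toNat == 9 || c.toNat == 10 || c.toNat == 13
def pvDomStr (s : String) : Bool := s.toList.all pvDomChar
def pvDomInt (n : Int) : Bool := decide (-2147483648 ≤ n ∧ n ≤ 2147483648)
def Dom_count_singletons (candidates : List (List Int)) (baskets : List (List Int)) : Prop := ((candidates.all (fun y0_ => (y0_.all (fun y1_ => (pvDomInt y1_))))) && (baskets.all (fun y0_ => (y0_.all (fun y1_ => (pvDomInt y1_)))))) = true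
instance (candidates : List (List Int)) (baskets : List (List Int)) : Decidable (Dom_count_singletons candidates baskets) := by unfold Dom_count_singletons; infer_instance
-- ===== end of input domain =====

-- B replaces A's dict-based counting plus final sort with sort-then-group:
-- sort the flattened baskets once and emit one [item, run-length] pair per
-- maximal run of equal elements. Equivalence is about the RETURN value; both
-- A and B sort the candidates list in place in the non-empty branch.

-- ===== PORT A =====
def count_singletons (candidates : List (List Int)) (baskets : List (List Int)) : List (List Int) :=
  let result : List (List Int) := []
  let result :=
    if candidates = [] then
      -- count = {}; for basket in baskets: for item in basket: count[item] = count.get(item,0)+1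
      let count : PySem.Dict Int Int :=
        baskets.foldl
          (fun d basket => basket.foldl (fun d item => d.insert item (d.getD item 0 + 1)) d)
          PySem.Dict.empty
      -- for (item, count) in count.items(): result.append([item, count])
      count.items.foldl (fun r p => r ++ [[p.1, p.2]]) result
    else
      candidates
  PySem.List.sorted result (fun x => x) false

-- ===== PORT B =====
-- the run walk: while i < n: scan the maximal run flat[i..j) of elements equal
-- to flat[i], append [flat[i], j - i], continue at j
def pvRuns (l : List Int) : List (List Int) :=
  match l with
  | [] => []
  | x :: xs =>
    [x, (1 + ((xs.takeWhile (fun y => y == x)).length : Int))] ::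
      pvRuns (xs.dropWhile (fun y => y == x))
termination_by l.length
decreasing_by
  simp only [List.length_cons]
  exact Nat.lt_succ_of_le (List.length_dropWhile_le _ _)

def count_singletons_alt (candidates : List (List Int)) (baskets : List (List Int)) : List (List Int) :=
  if candidates ≠ [] then
    PySem.List.sorted candidates (fun x => x) false
  else
    pvRuns (PySem.List.sorted (baskets.flatMap (fun basket => basket)) (fun x => x) false)

-- ===== PRECONDITION & SPEC =====
def Spec_count_singletons (candidates : List (List Int)) (baskets : List (List Int)) (out : List (List Int)) : Prop := out = count_singletons_alt candidates baskets
instance (candidates : List (List Int)) (baskets : List (List Int)) (out : List (List Int)) : Decidable (Spec_count_singletons candidates baskets out) := by unfold Spec_count_singletons; infer_instance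

-- ===== CLAIM (what is proved, stated in full; the proofs are below) =====
def Claim_equal_count_singletons : Prop := ∀ (candidates : List (List Int)) (baskets : List (List Int)), Dom_count_singletons candidates baskets → Spec_count_singletons candidates baskets (count_singletons candidates baskets)

-- ===== LEMMAS AND PROOFS =====

-- A's nested counting loop is the Counter of the flattened baskets.
theorem nested_foldl_eq_counter (baskets : List (List Int)) :
    baskets.foldl
      (fun d basket => basket.foldl (fun d item => d.insert item (d.getD item 0 + 1)) d)
      PySem.Dict.empty
    = PySem.Dict.counter (baskets.flatMap (fun basket => basket)) := by
  rw [← PySem.Dict.foldl_insert_getD_add_one_eq_counter]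
  simp only [List.flatMap_id']
  exact (List.foldl_flatten).symm

-- sorted_eq_of_perm_of_pairwise_lt, restated with the elaborated instances of the ports.
theorem sorted_listInt_eq_of_perm_of_pairwise_lt (xs ys : List (List Int))
    (hp : ys.Perm xs) (hpw : ys.Pairwise (· < ·)) :
    PySem.List.sorted xs (fun x => x) false = ys := by
  rw [show (fun (a b : List Int) => a.decidableLT b) = (LinearOrder.toDecidableLT) from
    funext fun a => funext fun b => Subsingleton.elim _ _]
  exact PySem.List.sorted_eq_of_perm_of_pairwise_lt _ _ _ hp hpw

-- Lexicographic order on two-element Int lists with strictly increasing heads.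
theorem pair_list_lt (a b x y : Int) (h : a < b) : ([a, x] : List Int) < [b, y] :=
  List.Lex.rel h

-- the run walk over a sorted list is the sorted distinct elements paired with their counts
theorem pvRuns_sorted_eq (l : List Int) (h : l.Pairwise (· ≤ ·)) :
    pvRuns l
      = (PySem.List.sorted (PySem.Set.ofList l) (fun x => x) false).map
          (fun i => [i, (l.count i : Int)]) := by
  induction l using pvRuns.induct with
  | case1 => simp [pvRuns, PySem.List.sorted_eq_nil_iff]
  | case2 x xs IH =>
    rw [List.pairwise_cons] at h
    obtain ⟨h1, h2⟩ := h
    set t : List Int := xs.takeWhile (fun y => y == x) with htdef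
    set d : List Int := xs.dropWhile (fun y => y == x) with hddef
    have hxs : t ++ d = xs := List.takeWhile_append_dropWhile
    have ht : ∀ y ∈ t, y = x := by
      intro y hy
      have : (y == x) = true := List.mem_takeWhile_imp (p := fun y => y == x) hy
      simpa using this
    have hdsub : d.Sublist xs := List.dropWhile_sublist _
    have hdpw : d.Pairwise (· ≤ ·) := h2.sublist hdsub
    have hxd : x ∉ d := by
      intro hx
      have hne : d ≠ [] := by intro e; rw [e] at hx; simp at hx
      have hph' : (d.head hne == x) = false := by
        simpa using List.head_dropWhile_not (fun y => y == x) (w := hne)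
      have hne' : d.head hne ≠ x := by simpa using hph'
      have hle1 : x ≤ d.head hne := h1 _ (hdsub.mem (List.head_mem hne))
      have hle2 : d.head hne ≤ x := by
        rcases List.mem_cons.mp ((List.cons_head_tail hne) ▸ hx) with h | h
        · exact le_of_eq h.symm
        · have hpw' : (d.head hne :: d.tail).Pairwise (· ≤ ·) := (List.cons_head_tail hne).symm ▸ hdpw
          exact (List.pairwise_cons.mp hpw').1 x h
      exact hne' (le_antisymm hle2 hle1)
    have hd : ∀ y ∈ d, x < y := by
      intro y hy
      exact lt_of_le_of_ne (h1 y (hdsub.mem hy)) (fun e => hxd (e ▸ hy))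
    -- the sorted distinct elements of x :: xs are x followed by those of d
    have hsorted : PySem.List.sorted (PySem.Set.ofList (x :: xs)) (fun x => x) false
        = x :: PySem.List.sorted (PySem.Set.ofList d) (fun x => x) false := by
      refine PySem.List.sorted_eq_of_perm_of_pairwise_lt _ _ _ ?_ ?_
      · refine (List.perm_ext_iff_of_nodup ?_ (PySem.Set.nodup_ofList _)).mpr ?_
        · refine List.nodup_cons.mpr ⟨?_, ?_⟩
          · intro hx
            exact hxd ((PySem.Set.mem_ofList _ _).mp ((PySem.List.mem_sorted _ _ _ _).mp hx))
          · exact ((PySem.List.sorted_perm _ _ _).nodup_iff).mpr (PySem.Set.nodup_ofList _)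
        · intro a
          simp only [List.mem_cons, PySem.List.mem_sorted, PySem.Set.mem_ofList, ← hxs,
            List.mem_append]
          constructor
          · rintro (rfl | h)
            · exact Or.inl rfl
            · exact Or.inr (Or.inr h)
          · rintro (rfl | h | h)
            · exact Or.inl rfl
            · exact Or.inl (ht a h)
            · exact Or.inr h
      · refine List.pairwise_cons.mpr ⟨?_, ?_⟩
        · intro y hy
          exact hd y ((PySem.Set.mem_ofList _ _).mp ((PySem.List.mem_sorted _ _ _ _).mp hy))
        · exact PySem.List.sorted_ofList_pairwise_lt d
    have hcx : (((x :: xs).count x : Int)) = 1 + (t.length : Int) := by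
      have h1' : xs.count x = t.length := by
        rw [← hxs, List.count_append,
          List.count_eq_length.mpr (fun b hb => ((ht b hb).symm ▸ rfl)),
          List.count_eq_zero.mpr hxd]
        simp
      simp [h1']
      omega
    have hci : ∀ i ∈ d, (((x :: xs).count i : Int)) = ((d.count i : Int)) := by
      intro i hi
      have hne : i ≠ x := fun e => hxd (e ▸ hi)
      have hit : i ∉ t := fun hmem => hne (ht i hmem)
      rw [List.count_cons, ← hxs, List.count_append, List.count_eq_zero.mpr hit]
      simp [Ne.symm hne]
    rw [pvRuns, hsorted, List.map_cons, ← htdef, ← hddef, IH hdpw, ← hcx]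
    congr 1
    refine List.map_congr_left ?_
    intro i hi
    rw [hci i ((PySem.Set.mem_ofList _ _).mp ((PySem.List.mem_sorted _ _ _ _).mp hi))]

theorem count_singletons_spec' (candidates baskets : List (List Int)) :
    count_singletons candidates baskets = count_singletons_alt candidates baskets := by
  unfold count_singletons count_singletons_alt
  by_cases hc : candidates = []
  · simp only [hc, ne_eq, not_true_eq_false, if_false, if_true,
      nested_foldl_eq_counter, PySem.Dict.items_counter,
      PySem.List.foldl_append_singleton_eq_map, List.nil_append, List.map_map]
    set flat : List Int := baskets.flatMap (fun basket => basket) with hflat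
    set sflat : List Int := PySem.List.sorted flat (fun x => x) false with hsflat
    have hperm : sflat.Perm flat := PySem.List.sorted_perm _ _ _
    have hsetperm : (PySem.Set.ofList sflat).Perm (PySem.Set.ofList flat) := by
      refine (List.perm_ext_iff_of_nodup (PySem.Set.nodup_ofList _) (PySem.Set.nodup_ofList _)).mpr ?_
      intro a
      simp only [PySem.Set.mem_ofList]
      exact hperm.mem_iff
    have hrun : pvRuns sflat
        = (PySem.List.sorted (PySem.Set.ofList flat) (fun x => x) false).map
            (fun i => [i, (flat.count i : Int)]) := by
      rw [pvRuns_sorted_eq sflat (by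
        have := PySem.List.sorted_pairwise flat (fun x => x) (κ := Int)
        exact this)]
      rw [PySem.List.sorted_eq_sorted_of_perm _ _ _ (fun a b h => h) hsetperm]
      refine List.map_congr_left ?_
      intro i _
      rw [hperm.count_eq]
    rw [hrun]
    refine sorted_listInt_eq_of_perm_of_pairwise_lt _ _ ((PySem.List.sorted_perm _ _ _).map _) ?_
    refine List.Pairwise.map _ ?_ (PySem.List.sorted_ofList_pairwise_lt flat)
    intro a b h
    exact pair_list_lt _ _ _ _ h
  · simp [hc]

-- ===== VERDICT (by name: the statement is the Claim_ definition above) =====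
theorem count_singletons_spec : Claim_equal_count_singletons := by
  intro c b _
  exact count_singletons_spec' c b
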